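-- pv_equiv track=rewrite | github.com/00001H/GameGui | widgets/linegraph.py | _startingfrom
-- ===== SOURCE A (Python) =====
-- def _startingfrom(ind,iterable):
--     iterat = iter(iterable)
--     try:
--         for i in range(ind):
--             next(iterat)
--         while True:
--             yield next(iterat)
--     except StopIteration:
--         return
-- ===== SOURCE B (Python) =====
-- def _startingfrom(ind, iterable):
--     yield from list(iterable)[max(ind, 0):]
-- ===== Notes on version B (the rewrite author's own statement) =====
-- stated objective: simpler
-- what changed: Replaces A's lazy iter/next handshake (explicit skip loop, while-True yield, try/except StopIteration) with a staged approach: materialize the iterable into a list, take one tail slice [max(ind,0):], and yield from it.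
import Mathlib
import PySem

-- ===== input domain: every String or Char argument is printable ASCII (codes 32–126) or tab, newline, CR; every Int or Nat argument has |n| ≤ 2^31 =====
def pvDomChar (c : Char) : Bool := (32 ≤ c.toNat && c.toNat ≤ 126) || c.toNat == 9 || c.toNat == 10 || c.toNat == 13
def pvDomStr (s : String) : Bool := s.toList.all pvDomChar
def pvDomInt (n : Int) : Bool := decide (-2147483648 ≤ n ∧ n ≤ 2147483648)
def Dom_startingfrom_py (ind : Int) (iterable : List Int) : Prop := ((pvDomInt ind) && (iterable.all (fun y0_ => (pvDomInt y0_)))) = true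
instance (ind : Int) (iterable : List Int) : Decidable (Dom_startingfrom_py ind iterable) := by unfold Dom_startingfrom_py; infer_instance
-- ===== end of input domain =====

-- B replaces A's lazy iter/next skip-and-yield loops with a staged version:
-- materialize the list, take the tail slice [max(ind,0):], yield it; simpler, same O(n).

-- ===== PORT A =====
-- for i in range(ind): next(iterat)  then  while True: yield next(iterat);
-- StopIteration at any point ends the generator (yielding what was produced so far).
def sfGoA : List Int → List Int → List Int
  | [], rest => rest                 -- skip loop done; while True yields the whole rest
  | _ :: _, [] => []                 -- StopIteration during the skip loop
  | _ :: is, _ :: rest => sfGoA is rest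

def startingfrom_py (ind : Int) (iterable : List Int) : List Int :=
  sfGoA (PySem.List.pyRange 0 ind 1) iterable

-- ===== PORT B =====
-- yield from list(iterable)[max(ind, 0):]
def startingfrom_py_alt (ind : Int) (iterable : List Int) : List Int :=
  PySem.List.slice iterable (some (max ind 0)) none

-- ===== PRECONDITION & SPEC =====
def Spec_startingfrom_py (ind : Int) (iterable : List Int) (out : List Int) : Prop := out = startingfrom_py_alt ind iterable
instance (ind : Int) (iterable : List Int) (out : List Int) : Decidable (Spec_startingfrom_py ind iterable out) := by unfold Spec_startingfrom_py; infer_instance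

-- ===== CLAIM =====
def Claim_equal_startingfrom_py : Prop := ∀ (ind : Int) (iterable : List Int), Dom_startingfrom_py ind iterable → Spec_startingfrom_py ind iterable (startingfrom_py ind iterable)

-- ===== LEMMAS AND PROOFS =====
theorem sfGoA_eq_drop (rs xs : List Int) : sfGoA rs xs = xs.drop rs.length := by
  induction rs generalizing xs with
  | nil => simp [sfGoA]
  | cons r rs ih =>
    cases xs with
    | nil => simp [sfGoA]
    | cons x xs => simpa [sfGoA] using ih xs

-- ===== VERDICT =====
theorem startingfrom_py_spec : Claim_equal_startingfrom_py := by
  intro ind iterable _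
  unfold Spec_startingfrom_py startingfrom_py startingfrom_py_alt
  rw [sfGoA_eq_drop, PySem.List.length_pyRange_one,
      PySem.List.slice_from _ (le_max_right ind 0)]
  congr 1
  omega
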